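-- pv_equiv track=rewrite | github.com/teamconfx/ConfFuzz2 | scripts/azure/util.py | match_strings
-- ===== SOURCE A (Python) =====
-- def match_strings(s, p):
--     if p == "" and s == "":
--         return True
--     if len(s) < len(p):
--         return False
--     j = 0
--     for i in range(len(s)):
--         if j == len(p) or s[i] != p[j]:
--             if s[i] in p or s[i].isalnum():
--                 return False
--         else:
--             j += 1
--     return j == len(p)
-- ===== SOURCE B (Python) =====
-- def match_strings(s, p):
--     # A char is "significant" if it occurs in p or is alphanumeric; A succeeds
--     # exactly when the significant chars of s, in order, spell out p.
--     return [c for c in s if c in p or c.isalnum()] == list(p)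
-- ===== Notes on version B (the rewrite author's own statement) =====
-- stated objective: simpler
-- what changed: Replaced the index-pointer loop with early returns and the length/empty guards by a single filter of s's significant characters (in p or alphanumeric) compared for equality with list(p).
import Mathlib
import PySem

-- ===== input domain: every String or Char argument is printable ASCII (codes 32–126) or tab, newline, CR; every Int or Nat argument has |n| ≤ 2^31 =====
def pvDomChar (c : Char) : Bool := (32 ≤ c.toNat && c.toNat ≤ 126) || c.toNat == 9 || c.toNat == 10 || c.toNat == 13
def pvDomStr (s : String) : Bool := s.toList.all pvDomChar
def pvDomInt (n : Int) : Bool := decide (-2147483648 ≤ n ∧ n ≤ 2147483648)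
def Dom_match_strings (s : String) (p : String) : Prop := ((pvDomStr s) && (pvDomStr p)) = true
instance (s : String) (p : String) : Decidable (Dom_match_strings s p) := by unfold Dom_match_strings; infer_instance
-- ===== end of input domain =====

-- B replaces A's pointer loop with a filter of s's significant chars compared to p (simpler).


-- ===== PORT A =====
-- the for-loop over range(len(s)) with state j and early returns, as a structural
-- recursion over the remaining characters of s carrying j
def matchLoopA (p : List Char) (cs : List Char) (j : Nat) : Bool :=
  match cs with
  | [] => j == p.length
  | c :: rest =>
    if j == p.length || p[j]? != some c then
      if p.contains c || PySem.Chars.isalnum c then false else matchLoopA p rest j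
    else matchLoopA p rest (j + 1)

def match_strings (s : String) (p : String) : Bool :=
  if p = "" && s = "" then true
  else if s.toList.length < p.toList.length then false
  else matchLoopA p.toList s.toList 0

-- ===== PORT B =====
def match_strings_alt (s : String) (p : String) : Bool :=
  (s.toList.filter (fun c => p.toList.contains c || PySem.Chars.isalnum c)) == p.toList

-- ===== PRECONDITION & SPEC =====
def Spec_match_strings (s : String) (p : String) (out : Bool) : Prop := out = match_strings_alt s p
instance (s : String) (p : String) (out : Bool) : Decidable (Spec_match_strings s p out) := by unfold Spec_match_strings; infer_instance

-- ===== CLAIM (what is proved, stated in full; the proofs are below) =====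
def Claim_equal_match_strings : Prop := ∀ (s : String) (p : String), Dom_match_strings s p → Spec_match_strings s p (match_strings s p)

-- ===== LEMMAS AND PROOFS =====

-- the loop accepts iff the significant chars of the rest equal the unmatched suffix of p
theorem matchLoopA_iff (p : List Char) (cs : List Char) (j : Nat) (hj : j ≤ p.length) :
    matchLoopA p cs j = true ↔
      cs.filter (fun c => p.contains c || PySem.Chars.isalnum c) = p.drop j := by
  induction cs generalizing j with
  | nil =>
    simp only [matchLoopA, List.filter_nil, beq_iff_eq]
    constructor
    · intro h; rw [h, List.drop_length]
    · intro h
      have := List.drop_eq_nil_iff.mp h.symm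
      omega
  | cons c rest ih =>
    by_cases hend : j = p.length
    · subst hend
      cases hsig : (p.contains c || PySem.Chars.isalnum c) with
      | true =>
        have hL : matchLoopA p (c :: rest) p.length = false := by
          simp only [matchLoopA, beq_self_eq_true, Bool.true_or]
          rw [if_pos trivial, if_pos hsig]
        have hsigP : c ∈ p ∨ PySem.Chars.isalnum c = true := by simpa using hsig
        rw [hL, List.drop_length]
        simp [List.filter_cons, hsigP]
      | false =>
        have hL : matchLoopA p (c :: rest) p.length = matchLoopA p rest p.length := by
          simp only [matchLoopA, beq_self_eq_true, Bool.true_or]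
          rw [if_pos trivial, if_neg (by rw [hsig]; simp)]
        obtain ⟨h1, h2⟩ : ¬c ∈ p ∧ PySem.Chars.isalnum c = false := by simpa using hsig
        rw [hL, ih _ (Nat.le_refl _)]
        simp [List.filter_cons, h1, h2]
    · have hjlt : j < p.length := Nat.lt_of_le_of_ne hj hend
      have hget : p[j]? = some p[j] := List.getElem?_eq_getElem hjlt
      have hdrop : p.drop j = p[j] :: p.drop (j + 1) := List.drop_eq_getElem_cons hjlt
      have hendb : (j == p.length) = false := by simp [hend]
      by_cases heq : c = p[j]
      · -- characters match: j advances; c occurs in p hence is significant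
        have hL : matchLoopA p (c :: rest) j = matchLoopA p rest (j + 1) := by
          simp only [matchLoopA, hendb, hget, heq, bne_self_eq_false, Bool.or_self]
          rw [if_neg (by simp)]
        have hmem : c ∈ p := heq ▸ p.getElem_mem hjlt
        rw [hL, ih _ hjlt, List.filter_cons_of_pos (l := rest) (by simp [hmem]), hdrop]
        constructor
        · intro h; rw [h, heq]
        · intro h; exact (List.cons.inj h).2
      · -- mismatch: either significant (returns False) or skipped
        have hcond : (p[j]? != some c) = true := by
          rw [hget]; simp; exact fun h => heq h.symm
        have hL : matchLoopA p (c :: rest) j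
            = if (p.contains c || PySem.Chars.isalnum c) = true then false
              else matchLoopA p rest j := by
          simp only [matchLoopA, hendb, hcond, Bool.false_or]
          rw [if_pos trivial]
        cases hsig : (p.contains c || PySem.Chars.isalnum c) with
        | true =>
          have hsigP : c ∈ p ∨ PySem.Chars.isalnum c = true := by simpa using hsig
          rw [hL, if_pos hsig, List.filter_cons_of_pos (l := rest) (by simpa using hsig), hdrop]
          exact iff_of_false (by simp) (fun h => heq (List.cons.inj h).1)
        | false =>
          obtain ⟨h1, h2⟩ : ¬c ∈ p ∧ PySem.Chars.isalnum c = false := by simpa using hsig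
          rw [hL, if_neg (by rw [hsig]; simp), ih _ hj]
          simp [List.filter_cons, h1, h2]

theorem filter_length_ne {cs ps : List Char} (h : cs.length < ps.length)
    (f : Char → Bool) : cs.filter f ≠ ps := by
  intro heq
  have := List.length_filter_le f cs
  rw [heq] at this
  omega

-- ===== VERDICT (by name: the statement is the Claim_ definition above) =====
theorem match_strings_spec : Claim_equal_match_strings := by
  intro s p _
  show match_strings s p = match_strings_alt s p
  by_cases hp : p = "" ∧ s = ""
  · obtain ⟨h1, h2⟩ := hp; subst h1; subst h2; decide
  · have hc : (decide (p = "") && decide (s = "")) = false := by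
      rcases not_and_or.mp hp with h | h <;> simp [h]
    simp only [match_strings, match_strings_alt]
    rw [if_neg (by simp [hc])]
    by_cases h2 : s.toList.length < p.toList.length
    · rw [if_pos h2]
      exact (beq_eq_false_iff_ne.mpr (filter_length_ne h2 _)).symm
    · rw [if_neg h2, Bool.eq_iff_iff, beq_iff_eq,
        matchLoopA_iff p.toList s.toList 0 (Nat.zero_le _), List.drop_zero]
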